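-- pv_equiv track=rewrite | github.com/pypi-data/pypi-mirror-323 | packages/janito/janito-0.8.0-py3-none-any.whl/janito/change/view/sections.py | create_sections
-- ===== SOURCE A (Python) =====
-- from typing import List, Tuple, Set
--
-- def create_sections(original: List[str], modified: List[str],
--                    different_lines: Set[int], context_lines: int) -> List[Tuple[List[str], List[str]]]:
--     """Create sections from different lines with context"""
--     current_section = set()
--     orig_content = []
--     mod_content = []
--
--     for line_num in sorted(different_lines):
--         if not current_section or line_num <= max(current_section) + context_lines * 2:
--             current_section.add(line_num)
--         else:
--             process_section(original, modified, current_section, orig_content,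
--                           mod_content, context_lines)
--             current_section = {line_num}
--
--     if current_section:
--         process_section(original, modified, current_section, orig_content,
--                        mod_content, context_lines)
--
--     return [(orig_content, mod_content)] if orig_content else []
--
-- def process_section(original: List[str], modified: List[str],
--                    current_section: Set[int], orig_content: List[str],
--                    mod_content: List[str], context_lines: int) -> None:
--     """Process a section and add it to the content lists"""
--     start = max(0, min(current_section) - context_lines)
--     end = min(max(len(original), len(modified)),
--              max(current_section) + context_lines + 1)
--
--     # Add separator if needed
--     if orig_content:
--         orig_content.append("...")
--         mod_content.append("...")
--
--     # Add section content
--     orig_content.extend(original[start:end])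
--     mod_content.extend(modified[start:end])
-- ===== SOURCE B (Python) =====
-- from itertools import accumulate, groupby
--
-- def create_sections(original, modified, different_lines, context_lines):
--     """Create sections from different lines with context"""
--     lines = sorted(different_lines)
--     total = max(len(original), len(modified))
--     # a break flag before each element that is too far from its predecessor
--     gaps = [0] + [1 if b > a + context_lines * 2 else 0 for a, b in zip(lines, lines[1:])]
--     # prefix-sum the flags into group ids and split the lines on them
--     runs = [[ln for _, ln in grp]
--             for _, grp in groupby(zip(accumulate(gaps), lines), key=lambda p: p[0])]
--     orig_content, mod_content = [], []
--     for run in runs: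
--         s = max(0, run[0] - context_lines)
--         e = min(total, run[-1] + context_lines + 1)
--         if orig_content:
--             orig_content.append("...")
--             mod_content.append("...")
--         orig_content += original[s:e]
--         mod_content += modified[s:e]
--     return [(orig_content, mod_content)] if orig_content else []
-- ===== Notes on version B (the rewrite author's own statement) =====
-- stated objective: faster
-- what changed: Replaces A's stateful greedy clustering (a growing set re-scanned by max() on every element and min()/max() again in a mutating process_section helper) by a declarative pipeline: gap flags computed from zipped adjacent pairs of the sorted lines, prefix-summed into group ids with itertools.accumulate, grouped with itertools.groupby, then each run rendered once with context and '...' separators.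
import Mathlib
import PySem

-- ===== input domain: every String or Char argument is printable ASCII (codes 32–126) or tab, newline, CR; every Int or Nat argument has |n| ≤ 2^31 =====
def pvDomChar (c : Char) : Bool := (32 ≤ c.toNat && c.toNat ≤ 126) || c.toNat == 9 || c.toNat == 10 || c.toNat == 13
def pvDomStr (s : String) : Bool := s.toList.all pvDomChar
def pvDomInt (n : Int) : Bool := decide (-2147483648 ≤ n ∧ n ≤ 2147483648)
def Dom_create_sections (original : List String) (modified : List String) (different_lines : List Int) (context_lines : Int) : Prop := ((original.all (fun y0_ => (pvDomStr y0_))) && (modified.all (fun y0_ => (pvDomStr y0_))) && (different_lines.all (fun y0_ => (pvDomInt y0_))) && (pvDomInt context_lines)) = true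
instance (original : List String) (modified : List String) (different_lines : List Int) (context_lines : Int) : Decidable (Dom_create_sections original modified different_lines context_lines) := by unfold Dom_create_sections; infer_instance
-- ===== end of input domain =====

-- B replaces A's stateful greedy clustering (growing set re-scanned by min/max, mutating
-- helper) by a declarative pipeline: gap flags from adjacent pairs, prefix-summed into
-- group ids, grouped, then rendered; same output. (A only mutates its own local lists.)

-- ===== PORT A =====
-- helper process_section: mutates the two content lists; ported as returning the new pair.
-- min/max of the section: Python raises on an empty set; every call site passes a
-- nonempty section, so the `.getD 0` default is unreachable.
def process_section (original : List String) (modified : List String)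
    (current_section : PySem.Set Int) (orig_content : List String)
    (mod_content : List String) (context_lines : Int) : List String × List String :=
  let start := max 0 ((PySem.List.min? current_section (fun x => x)).getD 0 - context_lines)
  let end_ := min (max (original.length : Int) (modified.length : Int))
                  ((PySem.List.max? current_section (fun x => x)).getD 0 + context_lines + 1)
  let (o, m) := if orig_content = [] then (orig_content, mod_content)
                else (orig_content ++ ["..."], mod_content ++ ["..."])
  (o ++ PySem.List.slice original (some start) (some end_),
   m ++ PySem.List.slice modified (some start) (some end_))

-- the body of A's `for line_num in sorted(different_lines)` loop
def csStepA (original : List String) (modified : List String) (context_lines : Int)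
    (st : PySem.Set Int × List String × List String) (line_num : Int) :
    PySem.Set Int × List String × List String :=
  if st.1 = [] then (PySem.Set.add st.1 line_num, st.2.1, st.2.2)
  else if line_num ≤ (PySem.List.max? st.1 (fun x => x)).getD 0 + context_lines * 2 then
    (PySem.Set.add st.1 line_num, st.2.1, st.2.2)
  else
    let (o, m) := process_section original modified st.1 st.2.1 st.2.2 context_lines
    (PySem.Set.ofList [line_num], o, m)

def create_sections (original : List String) (modified : List String) (different_lines : List Int) (context_lines : Int) : List (List String × List String) :=
  let st := (PySem.List.sorted different_lines (fun x => x) false).foldl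
              (csStepA original modified context_lines) (PySem.Set.empty, [], [])
  let fin := if st.1 = [] then (st.2.1, st.2.2)
             else process_section original modified st.1 st.2.1 st.2.2 context_lines
  if fin.1 = [] then [] else [(fin.1, fin.2)]

-- ===== PORT B =====
-- port of Source B's `accumulate` over the gap flags (running sum, started at 0)
def pyAccumulate : Int → List Int → List Int
  | _, [] => []
  | s, x :: t => (s + x) :: pyAccumulate (s + x) t

-- port of Source B's `groupby(..., key=lambda p: p[0])` + inner comprehension:
-- split the (group id, line) pairs into runs of equal group id, keeping the lines
def groupRuns : List (Int × Int) → List (List Int)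
  | [] => []
  | (g, x) :: t =>
      (x :: (t.takeWhile (fun p => p.1 == g)).map Prod.snd)
        :: groupRuns (t.dropWhile (fun p => p.1 == g))
termination_by l => l.length
decreasing_by
  exact Nat.lt_succ_of_le (List.length_dropWhile_le _ _)

-- the body of Source B's `for run in runs` loop; every run groupby yields is nonempty,
-- so the `.getD 0` defaults (Python's run[0] / run[-1]) are unreachable.
def joinR (original modified : List String) (total context_lines : Int)
    (acc : List String × List String) (run : List Int) : List String × List String :=
  let s := max 0 ((run.head?).getD 0 - context_lines)
  let e := min total ((run.getLast?).getD 0 + context_lines + 1)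
  let om := if acc.1 = [] then acc else (acc.1 ++ ["..."], acc.2 ++ ["..."])
  (om.1 ++ PySem.List.slice original (some s) (some e),
   om.2 ++ PySem.List.slice modified (some s) (some e))

def create_sections_alt (original : List String) (modified : List String) (different_lines : List Int) (context_lines : Int) : List (List String × List String) :=
  let lines := PySem.List.sorted different_lines (fun x => x) false
  let total : Int := max (original.length : Int) (modified.length : Int)
  let gaps := (0 : Int) :: (lines.zip (lines.drop 1)).map
                (fun p => if p.2 > p.1 + context_lines * 2 then (1 : Int) else 0)
  let runs := groupRuns ((pyAccumulate 0 gaps).zip lines)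
  let om := runs.foldl (joinR original modified total context_lines) ([], [])
  if om.1 = [] then [] else [(om.1, om.2)]

-- ===== PRECONDITION & SPEC =====
def Spec_create_sections (original : List String) (modified : List String) (different_lines : List Int) (context_lines : Int) (out : List (List String × List String)) : Prop := out = create_sections_alt original modified different_lines context_lines
instance (original : List String) (modified : List String) (different_lines : List Int) (context_lines : Int) (out : List (List String × List String)) : Decidable (Spec_create_sections original modified different_lines context_lines out) := by unfold Spec_create_sections; infer_instance

-- ===== CLAIM (what is proved, stated in full; the proofs are below) =====
def Claim_equal_create_sections : Prop := ∀ (original : List String) (modified : List String) (different_lines : List Int) (context_lines : Int), Dom_create_sections original modified different_lines context_lines → Spec_create_sections original modified different_lines context_lines (create_sections original modified different_lines context_lines)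

-- ===== LEMMAS AND PROOFS =====

-- ---- proof-side middle formulation: runs by structural splitting, rendered and joined ----

def gapFlag (c a b : Int) : Int := if b > a + c * 2 then (1 : Int) else 0

-- (last element of the first run, remainder) of a list, scanning by the cutoff
def split_run (c : Int) : Int → List Int → Int × List Int
  | last, [] => (last, [])
  | last, x :: t =>
      if x ≤ last + c * 2 then split_run c x t else (last, x :: t)

-- tail of the first run
def consumed (c : Int) : Int → List Int → List Int
  | _, [] => []
  | x, y :: t => if y ≤ x + c * 2 then y :: consumed c y t else []

lemma split_run_len (c : Int) : ∀ (last : Int) (l : List Int),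
    (split_run c last l).2.length ≤ l.length := by
  intro last l
  induction l generalizing last with
  | nil => simp [split_run]
  | cons x t ih =>
      simp only [split_run]
      split_ifs
      · exact le_trans (ih x) (by simp)
      · simp

def renderP (original modified : List String) (total context_lines lo hi : Int) :
    List String × List String :=
  let s := max 0 (lo - context_lines)
  let e := min total (hi + context_lines + 1)
  (PySem.List.slice original (some s) (some e), PySem.List.slice modified (some s) (some e))

def join_step (acc p : List String × List String) : List String × List String :=
  let om := if acc.1 = [] then acc else (acc.1 ++ ["..."], acc.2 ++ ["..."])
  (om.1 ++ p.1, om.2 ++ p.2)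

def sections_go (original modified : List String) (total context_lines : Int) :
    List Int → List (List String × List String)
  | [] => []
  | x :: t =>
      renderP original modified total context_lines x (split_run context_lines x t).1
        :: sections_go original modified total context_lines (split_run context_lines x t).2
termination_by l => l.length
decreasing_by
  simpa using Nat.lt_succ_of_le (split_run_len context_lines x t)

def mid (original modified : List String) (different_lines : List Int) (c : Int) :
    List (List String × List String) :=
  let lines := PySem.List.sorted different_lines (fun x => x) false
  let total : Int := max (original.length : Int) (modified.length : Int)
  let om := (sections_go original modified total c lines).foldl join_step ([], [])
  if om.1 = [] then [] else [(om.1, om.2)]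

-- ---- B-side: the gap-flag / prefix-sum / groupby pipeline equals the mid formulation ----

-- the (group id, line) pairs produced by zipping the accumulated flags with the tail
def chain (c : Int) : Int → Int → List (Int) → List (Int × Int)
  | _, _, [] => []
  | g, x, y :: t => (g + gapFlag c x y, y) :: chain c (g + gapFlag c x y) y t

lemma zipAcc (c : Int) : ∀ (t : List Int) (x g : Int),
    (pyAccumulate g (((x :: t).zip t).map (fun p => gapFlag c p.1 p.2))).zip t
      = chain c g x t := by
  intro t
  induction t with
  | nil => intro x g; simp [pyAccumulate, chain]
  | cons y t' ih =>
      intro x g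
      simp only [List.zip_cons_cons, List.map_cons, pyAccumulate, chain]
      rw [ih y (g + gapFlag c x y)]

lemma takeWhile_chain (c : Int) : ∀ (t : List Int) (x g : Int),
    ((chain c g x t).takeWhile (fun p => p.1 == g)).map Prod.snd = consumed c x t := by
  intro t
  induction t with
  | nil => intro x g; simp [chain, consumed]
  | cons y t' ih =>
      intro x g
      by_cases h : y ≤ x + c * 2
      · have hf : gapFlag c x y = 0 := by simp [gapFlag]; omega
        simp only [chain, consumed, hf, add_zero, if_pos h, List.takeWhile_cons]
        simp only [beq_self_eq_true, if_pos]
        simp [ih y g]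
      · have hf : gapFlag c x y = 1 := by simp [gapFlag]; omega
        have hne : ((g + 1 : Int) == g) = false := by
          simp only [beq_eq_false_iff_ne]; omega
        simp [chain, consumed, hf, h, hne]

lemma dropWhile_chain (c : Int) : ∀ (t : List Int) (x g : Int),
    (chain c g x t).dropWhile (fun p => p.1 == g)
      = (match (split_run c x t).2 with
         | [] => []
         | y :: t' => (g + 1, y) :: chain c (g + 1) y t') := by
  intro t
  induction t with
  | nil => intro x g; simp [chain, split_run]
  | cons y t' ih =>
      intro x g
      by_cases h : y ≤ x + c * 2
      · have hf : gapFlag c x y = 0 := by simp [gapFlag]; omega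
        simp only [chain, split_run, hf, add_zero, if_pos h, List.dropWhile_cons]
        simp only [beq_self_eq_true, if_pos]
        exact ih y g
      · have hf : gapFlag c x y = 1 := by simp [gapFlag]; omega
        have hne : ((g + 1 : Int) == g) = false := by
          simp only [beq_eq_false_iff_ne]; omega
        simp [chain, split_run, hf, h, hne]

lemma split_run_fst_eq_getLast (c : Int) : ∀ (t : List Int) (x : Int),
    (split_run c x t).1 = (x :: consumed c x t).getLast (by simp) := by
  intro t
  induction t with
  | nil => intro x; simp [split_run, consumed]
  | cons y t' ih =>
      intro x
      by_cases h : y ≤ x + c * 2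
      · simp only [split_run, consumed, if_pos h]
        rw [ih y]
        exact (List.getLast_cons (by simp)).symm
      · simp [split_run, consumed, h]

lemma fold_groupRuns (original modified : List String) (total c : Int) :
    ∀ (n : Nat) (t : List Int) (x g : Int) (acc : List String × List String),
    t.length ≤ n →
    (groupRuns ((g, x) :: chain c g x t)).foldl (joinR original modified total c) acc
      = ((renderP original modified total c x (split_run c x t).1)
          :: sections_go original modified total c (split_run c x t).2).foldl
          join_step acc := by
  intro n
  induction n with
  | zero =>
      intro t x g acc hlen
      have ht : t = [] := List.length_eq_zero_iff.mp (Nat.le_zero.mp hlen)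
      subst ht
      simp only [chain, groupRuns, split_run, sections_go, List.takeWhile_nil,
        List.dropWhile_nil, List.map_nil, List.foldl_cons, List.foldl_nil]
      simp [joinR, join_step, renderP]
  | succ n ih =>
      intro t x g acc hlen
      rw [groupRuns, takeWhile_chain, dropWhile_chain]
      have hgl : (x :: consumed c x t).getLast? = some ((x :: consumed c x t).getLast (by simp)) :=
        List.getLast?_eq_some_getLast (by simp)
      have hrun : joinR original modified total c acc (x :: consumed c x t)
          = join_step acc (renderP original modified total c x (split_run c x t).1) := by
        simp only [joinR, join_step, renderP, List.head?_cons, Option.getD_some, hgl,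
          split_run_fst_eq_getLast c t x]
      cases hrest : (split_run c x t).2 with
      | nil =>
          simp only [List.foldl_cons, List.foldl_nil, groupRuns, hrun, sections_go]
      | cons y t' =>
          have hlen' : t'.length ≤ n := by
            have := split_run_len c x t
            rw [hrest] at this
            simp at this
            omega
          simp only [List.foldl_cons, hrun, sections_go]
          exact ih t' y (g + 1) _ hlen'

-- B equals the mid formulation
lemma B_eq_mid (original modified : List String) (different_lines : List Int) (c : Int) :
    create_sections_alt original modified different_lines c
      = mid original modified different_lines c := by
  unfold create_sections_alt mid
  cases hs : PySem.List.sorted different_lines (fun x => x) false with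
  | nil => simp [pyAccumulate, groupRuns, sections_go]
  | cons x t =>
      have hzip : (pyAccumulate 0 ((0 : Int) :: ((x :: t).zip ((x :: t).drop 1)).map
            (fun p => if p.2 > p.1 + c * 2 then (1 : Int) else 0))).zip (x :: t)
          = (0, x) :: chain c 0 x t := by
        have : (fun (p : Int × Int) => if p.2 > p.1 + c * 2 then (1 : Int) else 0)
            = fun p => gapFlag c p.1 p.2 := rfl
        rw [this]
        simp only [List.drop_one, List.tail_cons, pyAccumulate, List.zip_cons_cons, add_zero]
        rw [zipAcc c t x 0]
      simp only [hzip]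
      rw [fold_groupRuns original modified _ c t.length t x 0 ([], []) le_rfl]
      simp only [sections_go]

-- ---- A-side: the interleaved fold equals the mid formulation ----

def finishA (original modified : List String) (c : Int)
    (st : PySem.Set Int × List String × List String) : List String × List String :=
  if st.1 = [] then (st.2.1, st.2.2)
  else process_section original modified st.1 st.2.1 st.2.2 c

-- running max/min of a ≤-sorted nonempty list are its last/first elements
lemma foldl_max_sorted : ∀ (t : List Int) (x : Int), (x :: t).Pairwise (· ≤ ·) →
    t.foldl max x = (x :: t).getLast (by simp) := by
  intro t
  induction t with
  | nil => intro x _; simp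
  | cons y t ih =>
      intro x h
      have hxy : x ≤ y := (List.pairwise_cons.mp h).1 y (by simp)
      have h' : (y :: t).Pairwise (· ≤ ·) := (List.pairwise_cons.mp h).2
      simp only [List.foldl_cons, max_eq_right hxy]
      rw [ih y h']
      simp [List.getLast_cons]

lemma foldl_min_sorted : ∀ (t : List Int) (x : Int), (∀ y ∈ t, x ≤ y) →
    t.foldl min x = x := by
  intro t
  induction t with
  | nil => intro x _; simp
  | cons y t ih =>
      intro x h
      have hxy : x ≤ y := h y (by simp)
      simp only [List.foldl_cons, min_eq_left hxy]
      exact ih x (fun z hz => h z (by simp [hz]))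

lemma max?_sorted (cs : List Int) (hcs : cs.Pairwise (· ≤ ·)) (hne : cs ≠ []) :
    PySem.List.max? cs (fun x => x) = some (cs.getLast hne) := by
  cases cs with
  | nil => exact absurd rfl hne
  | cons x t =>
      rw [PySem.List.max?_id_cons, foldl_max_sorted t x hcs]

lemma min?_sorted (cs : List Int) (hcs : cs.Pairwise (· ≤ ·)) (x : Int) (t : List Int)
    (h : cs = x :: t) : PySem.List.min? cs (fun y => y) = some x := by
  subst h
  rw [PySem.List.min?_id_cons, foldl_min_sorted t x]
  intro y hy
  exact (List.pairwise_cons.mp hcs).1 y hy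

lemma mem_le_getLast : ∀ (cs : List Int) (hne : cs ≠ []), cs.Pairwise (· ≤ ·) →
    ∀ y ∈ cs, y ≤ cs.getLast hne := by
  intro cs
  induction cs with
  | nil => intro h; exact absurd rfl h
  | cons x t ih =>
      intro _ hp y hy
      cases t with
      | nil => simp at hy; simp [hy]
      | cons z t' =>
          rw [List.getLast_cons (by simp)]
          rcases List.mem_cons.mp hy with h | h
          · subst h
            have hxz : y ≤ z := (List.pairwise_cons.mp hp).1 z (by simp)
            exact le_trans hxz (ih (by simp) (List.pairwise_cons.mp hp).2 z (by simp))
          · exact ih (by simp) (List.pairwise_cons.mp hp).2 y h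

-- process_section on a sorted section with bounds (lo, hi) is one join step with its render pair
lemma process_eq_join (original modified : List String) (c total : Int)
    (htot : total = max (original.length : Int) (modified.length : Int))
    (cs : List Int) (hcs : cs.Pairwise (· ≤ ·)) (lo hi : Int) (t : List Int)
    (hlo : cs = lo :: t) (hne : cs ≠ []) (hhi : cs.getLast hne = hi) (o m : List String) :
    process_section original modified cs o m c
      = join_step (o, m) (renderP original modified total c lo hi) := by
  simp only [process_section, join_step, renderP, min?_sorted cs hcs lo t hlo,
    max?_sorted cs hcs hne, hhi, htot, Option.getD_some]

-- main loop invariant: A's interleaved fold equals run-splitting followed by joining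
lemma loop_equiv (original modified : List String) (c total : Int)
    (htot : total = max (original.length : Int) (modified.length : Int)) :
    ∀ (l : List Int), l.Pairwise (· ≤ ·) →
    ∀ (cs : List Int) (lo hi : Int) (o m : List String)
      (hcs : cs.Pairwise (· < ·)) (t : List Int) (hlo : cs = lo :: t)
      (hne : cs ≠ []) (hhi : cs.getLast hne = hi)
      (hbound : ∀ x ∈ l, hi ≤ x),
    finishA original modified c (l.foldl (csStepA original modified c) (cs, o, m))
      = (renderP original modified total c lo (split_run c hi l).1
          :: sections_go original modified total c (split_run c hi l).2).foldl
          join_step (o, m) := by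
  intro l
  induction l with
  | nil =>
      intro _ cs lo hi o m hcs t hlo hne hhi _
      have hle : cs.Pairwise (· ≤ ·) := hcs.imp (fun h => le_of_lt h)
      simp only [List.foldl_nil, finishA, if_neg hne, split_run, sections_go,
        List.foldl_cons, List.foldl_nil]
      exact process_eq_join original modified c total htot cs hle lo hi t hlo hne hhi o m
  | cons x l ih =>
      intro hl cs lo hi o m hcs t hlo hne hhi hbound
      have hl' : l.Pairwise (· ≤ ·) := (List.pairwise_cons.mp hl).2
      have hxl : ∀ y ∈ l, x ≤ y := (List.pairwise_cons.mp hl).1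
      have hhix : hi ≤ x := hbound x (by simp)
      have hle : cs.Pairwise (· ≤ ·) := hcs.imp (fun h => le_of_lt h)
      have hmax : PySem.List.max? cs (fun y => y) = some hi := by
        rw [max?_sorted cs hle hne, hhi]
      have hub : ∀ y ∈ cs, y ≤ hi := by
        intro y hy
        subst hhi
        exact mem_le_getLast cs hne hle y hy
      simp only [List.foldl_cons]
      by_cases hcut : x ≤ hi + c * 2
      · -- x joins the current run in both programs
        have hstep : csStepA original modified c (cs, o, m) x = (PySem.Set.add cs x, o, m) := by
          simp [csStepA, hne, hmax, hcut]
        have hsplit : split_run c hi (x :: l) = split_run c x l := by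
          simp [split_run, hcut]
        rw [hstep, hsplit]
        by_cases hxhi : x = hi
        · -- duplicate line: the set add is a no-op and the bounds are unchanged
          have hmem : x ∈ cs := by
            subst hxhi hhi; exact List.getLast_mem hne
          rw [PySem.Set.add_of_mem hmem]
          subst hxhi
          exact ih hl' cs lo x o m hcs t hlo hne hhi (fun y hy => hxl y hy)
        · have hlt : hi < x := lt_of_le_of_ne hhix (fun h => hxhi h.symm)
          have hnot : x ∉ cs := fun hmem => absurd (hub x hmem) (not_le.mpr hlt)
          rw [PySem.Set.add_of_not_mem hnot]
          have hcs' : (cs ++ [x]).Pairwise (· < ·) := by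
            rw [List.pairwise_append]
            exact ⟨hcs, List.pairwise_singleton _ _,
              fun a ha b hb => by
                have := hub a ha
                simp at hb; subst hb; omega⟩
          have hne' : cs ++ [x] ≠ [] := by simp
          refine ih hl' (cs ++ [x]) lo x o m hcs' (t ++ [x]) (by simp [hlo]) hne'
            (by simp) (fun y hy => hxl y hy)
      · -- x breaks the run: A renders the section now, the run splits here
        have hstep : csStepA original modified c (cs, o, m) x
            = ([x], (process_section original modified cs o m c).1,
                    (process_section original modified cs o m c).2) := by
          simp [csStepA, hne, hmax, hcut, PySem.Set.ofList]
        have hsplit : split_run c hi (x :: l) = (hi, x :: l) := by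
          simp [split_run, hcut]
        rw [hstep, hsplit]
        have hrec := ih hl' [x] x x
          (process_section original modified cs o m c).1
          (process_section original modified cs o m c).2
          (List.pairwise_singleton _ _) [] rfl (by simp) rfl (fun y hy => hxl y hy)
        simp only [sections_go, List.foldl_cons] at hrec ⊢
        rw [hrec]
        congr 1
        rw [process_eq_join original modified c total htot cs hle lo hi t hlo hne hhi o m]

-- A equals the mid formulation
lemma A_eq_mid (original modified : List String) (different_lines : List Int) (c : Int) :
    create_sections original modified different_lines c
      = mid original modified different_lines c := by
  unfold create_sections mid
  have hsorted : (PySem.List.sorted different_lines (fun x => x) false).Pairwise (· ≤ ·) :=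
    PySem.List.sorted_pairwise different_lines (fun x => x)
  cases hs : PySem.List.sorted different_lines (fun x => x) false with
  | nil => simp [sections_go]
  | cons x rest =>
      rw [hs] at hsorted
      have hxl : ∀ y ∈ rest, x ≤ y := (List.pairwise_cons.mp hsorted).1
      have hrest : rest.Pairwise (· ≤ ·) := (List.pairwise_cons.mp hsorted).2
      have hstepA : csStepA original modified c (PySem.Set.empty, [], []) x
          = ([x], [], []) := by simp [csStepA, PySem.Set.empty, PySem.Set.add]
      have key := loop_equiv original modified c
        (max (original.length : Int) (modified.length : Int)) rfl rest hrest
        [x] x x [] [] (List.pairwise_singleton _ _) [] rfl (by simp) rfl hxl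
      simp only [List.foldl_cons, hstepA, sections_go]
      simp only [finishA] at key
      rw [key]
      simp only [List.foldl_cons]

-- ===== VERDICT (by name: the statement is the Claim_ definition above) =====
theorem create_sections_spec : Claim_equal_create_sections := by
  intro original modified different_lines context_lines _
  unfold Spec_create_sections
  rw [A_eq_mid, B_eq_mid]
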